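-- pv_equiv track=rewrite | github.com/fivosts/AITrace | AITrace/datasets/preprocessors.py | IsolateHechtVisitors
-- ===== SOURCE A (Python) =====
-- import typing
--
-- def IsolateHechtVisitors(text: str) -> typing.List[str]:
--   """
--   Within Hecht museum data, parse log file and
--   split all visitor entries into separate text entities.
--   """
--   visitors = []
--   start_keyword = "**************************    visitor: "
--   line_iter = text.split('\n')
--   l_idx = 0
--   while l_idx < len(line_iter):
--     cur_line = line_iter[l_idx]
--     cur_vis  = []
--     if start_keyword in cur_line:
--       cur_vis.append(cur_line)
--       l_idx += 1
--       while l_idx < len(line_iter) and start_keyword not in line_iter[l_idx]: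
--         cur_vis.append(line_iter[l_idx])
--         l_idx += 1
--       visitors.append('\n'.join(cur_vis))
--     else:
--       l_idx += 1
--   return visitors
-- ===== SOURCE B (Python) =====
-- import typing
--
-- def IsolateHechtVisitors(text: str) -> typing.List[str]:
--   """
--   Split the Hecht museum log into per-visitor entries in ONE flat pass:
--   a keyword line opens a new group, any other line joins the current
--   group (lines before the first keyword are dropped); join at the end.
--   """
--   start_keyword = "**************************    visitor: "
--   groups = []
--   for line in text.split('\n'):
--     if start_keyword in line:
--       groups.append([line])
--     elif groups:
--       groups[-1].append(line)
--   return ['\n'.join(g) for g in groups]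
-- ===== Notes on version B (the rewrite author's own statement) =====
-- stated objective: simpler
-- what changed: Replaces A's nested while-loops with manual index walking by a single flat pass over the lines that opens a new group at each keyword line and appends other lines to the last group, joining the groups at the end.
import Mathlib
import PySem

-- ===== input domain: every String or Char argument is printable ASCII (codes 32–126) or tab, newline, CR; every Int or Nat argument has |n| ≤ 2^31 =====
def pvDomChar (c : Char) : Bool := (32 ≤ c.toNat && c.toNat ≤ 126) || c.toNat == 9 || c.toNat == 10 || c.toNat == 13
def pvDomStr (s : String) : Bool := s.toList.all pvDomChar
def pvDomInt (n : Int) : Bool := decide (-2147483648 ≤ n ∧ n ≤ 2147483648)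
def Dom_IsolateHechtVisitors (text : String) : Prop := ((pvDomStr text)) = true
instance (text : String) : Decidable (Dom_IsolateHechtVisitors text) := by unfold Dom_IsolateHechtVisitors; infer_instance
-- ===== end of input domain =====

-- B replaces A's nested while-loop walk by one flat pass that opens a group at each
-- keyword line and appends other lines to the last group (objective: simpler).

-- ===== PORT A =====
def pvKw : String := "**************************    visitor: "

-- A's inner while: collect lines until the next keyword line (or end); returns (collected, rest)
def pvInnerA : List String → List String × List String
  | [] => ([], [])
  | l :: rest =>
    if PySem.Str.isIn pvKw l then ([], l :: rest)
    else (l :: (pvInnerA rest).1, (pvInnerA rest).2)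

theorem pvInnerA_len : ∀ (xs : List String), (pvInnerA xs).2.length ≤ xs.length
  | [] => Nat.le_refl _
  | l :: rest => by
    simp only [pvInnerA]
    split
    · simp
    · exact Nat.le_succ_of_le (pvInnerA_len rest)

-- A's outer while over the remaining lines
def pvOuterA : List String → List String
  | [] => []
  | l :: rest =>
    if PySem.Str.isIn pvKw l then
      let p := pvInnerA rest
      PySem.Str.join "\n" (l :: p.1) :: pvOuterA p.2
    else pvOuterA rest
  termination_by xs => xs.length
  decreasing_by
  · exact Nat.lt_succ_of_le (pvInnerA_len rest)
  · simp

def IsolateHechtVisitors (text : String) : List String :=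
  pvOuterA ((PySem.Str.split? text "\n").getD [])

-- ===== PORT B =====
-- one step of B's flat loop: keyword line opens a group, other lines extend the last group
def pvStepB (acc : List (List String)) (line : String) : List (List String) :=
  if PySem.Str.isIn pvKw line then acc ++ [[line]]
  else
    match acc with
    | [] => []
    | _ :: _ => acc.dropLast ++ [acc.getLast! ++ [line]]

def IsolateHechtVisitors_alt (text : String) : List String :=
  let groups := ((PySem.Str.split? text "\n").getD []).foldl pvStepB []
  groups.map (fun g => PySem.Str.join "\n" g)

-- ===== PRECONDITION & SPEC =====
def Spec_IsolateHechtVisitors (text : String) (out : List String) : Prop := out = IsolateHechtVisitors_alt text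
instance (text : String) (out : List String) : Decidable (Spec_IsolateHechtVisitors text out) := by unfold Spec_IsolateHechtVisitors; infer_instance

-- ===== CLAIM (what is proved, stated in full; the proofs are below) =====
def Claim_equal_IsolateHechtVisitors : Prop := ∀ (text : String), Dom_IsolateHechtVisitors text → Spec_IsolateHechtVisitors text (IsolateHechtVisitors text)

-- ===== LEMMAS AND PROOFS =====

theorem pvGetLast!_concat (init : List (List String)) (g : List String) :
    (init ++ [g]).getLast! = g := by
  have h : (init ++ [g]).getLast? = some g := List.getLast?_concat
  simp [List.getLast!_eq_getLast?_getD, h]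

-- appending a line to the last group of a nonempty group list
theorem pvStepB_nonkw (init : List (List String)) (g : List String) (l : String)
    (h : PySem.Str.isIn pvKw l = false) :
    pvStepB (init ++ [g]) l = init ++ [g ++ [l]] := by
  have h2 : PySem.Chars.isIn pvKw.toList l.toList = false := by simpa using h
  cases init with
  | nil =>
    simp only [pvStepB, PySem.Str.isIn_eq, h2, Bool.false_eq_true, if_false, List.nil_append]
    simp
  | cons a as =>
    simp only [pvStepB, PySem.Str.isIn_eq, h2, Bool.false_eq_true, if_false]
    rw [List.dropLast_concat, pvGetLast!_concat]
    simp

theorem pvOuterA_cons (l : String) (rest : List String) :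
    pvOuterA (l :: rest)
      = if PySem.Chars.isIn pvKw.toList l.toList = true then
          PySem.Str.join "\n" (l :: (pvInnerA rest).1) :: pvOuterA (pvInnerA rest).2
        else pvOuterA rest := by
  conv_lhs => rw [pvOuterA.eq_def]
  simp

-- the flat loop starting from a nonempty accumulator, against A's span decomposition
theorem pvFoldB (lines : List String) : ∀ (init : List (List String)) (g : List String),
    (lines.foldl pvStepB (init ++ [g])).map (fun h => PySem.Str.join "\n" h)
      = init.map (fun h => PySem.Str.join "\n" h)
        ++ [PySem.Str.join "\n" (g ++ (pvInnerA lines).1)]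
        ++ pvOuterA (pvInnerA lines).2 := by
  induction lines with
  | nil => intro init g; simp [pvInnerA, pvOuterA]
  | cons l rest ih =>
    intro init g
    by_cases hk : PySem.Str.isIn pvKw l = true
    · have hk2 : PySem.Chars.isIn pvKw.toList l.toList = true := by simpa using hk
      have hstep : pvStepB (init ++ [g]) l = (init ++ [g]) ++ [[l]] := by
        simp [pvStepB, hk2]
      rw [List.foldl_cons, hstep, ih (init ++ [g]) [l]]
      simp [pvInnerA, hk2, pvOuterA_cons]
    · have hk2 : PySem.Chars.isIn pvKw.toList l.toList = false := by simpa using hk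
      have hk' : PySem.Str.isIn pvKw l = false := by simpa using hk
      rw [List.foldl_cons, pvStepB_nonkw init g l hk', ih init (g ++ [l])]
      simp [pvInnerA, hk2]

-- ===== VERDICT (by name: the statement is the Claim_ definition above) =====
theorem IsolateHechtVisitors_spec : Claim_equal_IsolateHechtVisitors := by
  intro text _
  unfold Spec_IsolateHechtVisitors IsolateHechtVisitors IsolateHechtVisitors_alt
  generalize ((PySem.Str.split? text "\n").getD []) = lines
  induction lines with
  | nil => simp [pvOuterA]
  | cons l rest ih =>
    by_cases hk : PySem.Str.isIn pvKw l = true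
    · have hk2 : PySem.Chars.isIn pvKw.toList l.toList = true := by simpa using hk
      have hstep : pvStepB [] l = [] ++ [[l]] := by simp [pvStepB, hk2]
      rw [pvOuterA_cons]
      simp only [List.foldl_cons, hstep, hk2, if_true]
      rw [pvFoldB rest [] [l]]
      simp
    · have hk2 : PySem.Chars.isIn pvKw.toList l.toList = false := by simpa using hk
      rw [pvOuterA_cons]
      simp only [List.foldl_cons, hk2, Bool.false_eq_true, if_false]
      have hstep : pvStepB [] l = [] := by simp [pvStepB, hk2]
      rw [hstep]
      simpa using ih
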